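-- pv_equiv track=rewrite | github.com/ga1008/classshare | classroom_app/services/psych_profile_service.py | normalize_psych_profile_payload
-- ===== SOURCE A (Python) =====
-- from typing import Any, Optional
--
-- def normalize_psych_profile_payload(payload: dict[str, Any]) -> dict[str, str]:
--     def _clean(value: Any) -> str:
--         if value is None:
--             return ""
--         return str(value).strip()
--
--     profile_summary = _clean(
--         payload.get("user_profile_summary")
--         or payload.get("profile_summary")
--         or payload.get("learning_profile")
--     )
--     mental_state_summary = _clean(
--         payload.get("mental_state_summary")
--         or payload.get("mental_state")
--         or payload.get("current_state")
--     )
--     support_strategy = _clean(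
--         payload.get("support_strategy")
--         or payload.get("guidance_strategy")
--         or payload.get("response_strategy")
--     )
--     hidden_premise_prompt = _clean(
--         payload.get("hidden_premise_prompt")
--         or payload.get("assistant_premise")
--         or payload.get("hidden_prompt")
--     )
--     personality_traits = _clean(
--         payload.get("personality_traits")
--         or payload.get("personality_summary")
--         or payload.get("personality_guess")
--     )
--     preference_summary = _clean(
--         payload.get("preference_summary")
--         or payload.get("preferences")
--         or payload.get("interest_preferences")
--     )
--     language_habit_summary = _clean(
--         payload.get("language_habit_summary")
--         or payload.get("language_style")
--         or payload.get("expression_habits")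
--     )
--     preferred_ai_style = _clean(
--         payload.get("preferred_ai_style")
--         or payload.get("preferred_assistant_style")
--         or payload.get("preferred_response_style")
--     )
--     interest_hypothesis = _clean(
--         payload.get("interest_hypothesis")
--         or payload.get("interest_guess")
--         or payload.get("interest_summary")
--     )
--     evidence_summary = _clean(
--         payload.get("evidence_summary")
--         or payload.get("observation_evidence")
--         or payload.get("evidence")
--     )
--     confidence = _clean(payload.get("confidence") or "medium").lower()
--
--     if not hidden_premise_prompt:
--         hidden_parts = [mental_state_summary, preferred_ai_style, support_strategy]
--         hidden_premise_prompt = "；".join(part for part in hidden_parts if part)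
--
--     if confidence not in {"low", "medium", "high"}:
--         confidence = "medium"
--
--     return {
--         "profile_summary": profile_summary,
--         "mental_state_summary": mental_state_summary,
--         "support_strategy": support_strategy,
--         "hidden_premise_prompt": hidden_premise_prompt,
--         "personality_traits": personality_traits,
--         "preference_summary": preference_summary,
--         "language_habit_summary": language_habit_summary,
--         "preferred_ai_style": preferred_ai_style,
--         "interest_hypothesis": interest_hypothesis,
--         "evidence_summary": evidence_summary,
--         "confidence": confidence,
--     }
-- ===== SOURCE B (Python) =====
-- # B: single pass over the payload items driven by a reverse index
-- # (source key -> (output field, priority slot)), instead of probing the dict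
-- # with eleven or-chains; candidates land in per-field priority slots and the
-- # best one is picked afterwards.
--
-- _SLOTS = {
--     "user_profile_summary": ("profile_summary", 0),
--     "profile_summary": ("profile_summary", 1),
--     "learning_profile": ("profile_summary", 2),
--     "mental_state_summary": ("mental_state_summary", 0),
--     "mental_state": ("mental_state_summary", 1),
--     "current_state": ("mental_state_summary", 2),
--     "support_strategy": ("support_strategy", 0),
--     "guidance_strategy": ("support_strategy", 1),
--     "response_strategy": ("support_strategy", 2),
--     "hidden_premise_prompt": ("hidden_premise_prompt", 0),
--     "assistant_premise": ("hidden_premise_prompt", 1),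
--     "hidden_prompt": ("hidden_premise_prompt", 2),
--     "personality_traits": ("personality_traits", 0),
--     "personality_summary": ("personality_traits", 1),
--     "personality_guess": ("personality_traits", 2),
--     "preference_summary": ("preference_summary", 0),
--     "preferences": ("preference_summary", 1),
--     "interest_preferences": ("preference_summary", 2),
--     "language_habit_summary": ("language_habit_summary", 0),
--     "language_style": ("language_habit_summary", 1),
--     "expression_habits": ("language_habit_summary", 2),
--     "preferred_ai_style": ("preferred_ai_style", 0),
--     "preferred_assistant_style": ("preferred_ai_style", 1),
--     "preferred_response_style": ("preferred_ai_style", 2),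
--     "interest_hypothesis": ("interest_hypothesis", 0),
--     "interest_guess": ("interest_hypothesis", 1),
--     "interest_summary": ("interest_hypothesis", 2),
--     "evidence_summary": ("evidence_summary", 0),
--     "observation_evidence": ("evidence_summary", 1),
--     "evidence": ("evidence_summary", 2),
-- }
--
-- _ORDER = [
--     "profile_summary", "mental_state_summary", "support_strategy",
--     "hidden_premise_prompt", "personality_traits", "preference_summary",
--     "language_habit_summary", "preferred_ai_style", "interest_hypothesis",
--     "evidence_summary",
-- ]
--
--
-- def normalize_psych_profile_payload(payload):
--     cand = {field: [None, None, None] for field in _ORDER}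
--     conf = None
--     for key, value in payload.items():
--         if key == "confidence":
--             conf = value
--         else:
--             slot = _SLOTS.get(key)
--             if slot is not None:
--                 field, rank = slot
--                 cand[field][rank] = value
--
--     out = {}
--     for field in _ORDER:
--         picked = ""
--         for x in cand[field]:
--             if x:
--                 picked = str(x).strip()
--                 break
--         out[field] = picked
--
--     if not out["hidden_premise_prompt"]:
--         out["hidden_premise_prompt"] = "；".join(
--             p for p in (out["mental_state_summary"], out["preferred_ai_style"],
--                         out["support_strategy"]) if p)
--
--     c = str(conf).strip().lower() if conf else "medium"
--     out["confidence"] = c if c in {"low", "medium", "high"} else "medium"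
--     return out
-- ===== Notes on version B (the rewrite author's own statement) =====
-- stated objective: alternative
-- what changed: Inverts the data flow: instead of A's eleven _clean(get or get or get) probes into the dict, B makes one pass over the payload items with a reverse source-key->(field, priority-slot) index, stores each value in its field's priority slot, then picks the first truthy slot per field.
import Mathlib
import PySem

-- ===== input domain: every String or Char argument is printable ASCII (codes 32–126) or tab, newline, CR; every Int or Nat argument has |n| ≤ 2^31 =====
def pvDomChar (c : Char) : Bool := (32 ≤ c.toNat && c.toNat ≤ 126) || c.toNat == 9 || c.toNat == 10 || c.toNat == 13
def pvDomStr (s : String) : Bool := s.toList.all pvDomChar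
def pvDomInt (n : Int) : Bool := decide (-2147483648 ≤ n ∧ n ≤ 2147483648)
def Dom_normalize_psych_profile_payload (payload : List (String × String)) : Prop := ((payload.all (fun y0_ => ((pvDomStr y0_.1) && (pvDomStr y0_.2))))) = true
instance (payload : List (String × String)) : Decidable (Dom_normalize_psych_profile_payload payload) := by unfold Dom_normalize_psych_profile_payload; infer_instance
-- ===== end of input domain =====

-- B inverts the data flow: one pass over the payload items with a reverse
-- source-key -> (field, priority-slot) index, instead of A's eleven
-- `_clean(get or get or get)` probes; objective: alternative. Return value only.

-- ===== PORT A =====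
-- Python `x or y` on optional strings: x if x is truthy (a non-empty string) else y
def pvOr (a b : Option String) : Option String := if a.getD "" = "" then b else a
-- `_clean`: None -> "", otherwise str(value).strip() (values are strings here)
def pvClean (o : Option String) : String := match o with | none => "" | some s => PySem.Str.strip s

def normalize_psych_profile_payload (payload : List (String × String)) : List (String × String) :=
  let d := PySem.Dict.ofList payload
  let profile_summary := pvClean (pvOr (pvOr (d.get? "user_profile_summary") (d.get? "profile_summary")) (d.get? "learning_profile"))
  let mental_state_summary := pvClean (pvOr (pvOr (d.get? "mental_state_summary") (d.get? "mental_state")) (d.get? "current_state"))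
  let support_strategy := pvClean (pvOr (pvOr (d.get? "support_strategy") (d.get? "guidance_strategy")) (d.get? "response_strategy"))
  let hidden_premise_prompt := pvClean (pvOr (pvOr (d.get? "hidden_premise_prompt") (d.get? "assistant_premise")) (d.get? "hidden_prompt"))
  let personality_traits := pvClean (pvOr (pvOr (d.get? "personality_traits") (d.get? "personality_summary")) (d.get? "personality_guess"))
  let preference_summary := pvClean (pvOr (pvOr (d.get? "preference_summary") (d.get? "preferences")) (d.get? "interest_preferences"))
  let language_habit_summary := pvClean (pvOr (pvOr (d.get? "language_habit_summary") (d.get? "language_style")) (d.get? "expression_habits"))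
  let preferred_ai_style := pvClean (pvOr (pvOr (d.get? "preferred_ai_style") (d.get? "preferred_assistant_style")) (d.get? "preferred_response_style"))
  let interest_hypothesis := pvClean (pvOr (pvOr (d.get? "interest_hypothesis") (d.get? "interest_guess")) (d.get? "interest_summary"))
  let evidence_summary := pvClean (pvOr (pvOr (d.get? "evidence_summary") (d.get? "observation_evidence")) (d.get? "evidence"))
  let confidence := PySem.Str.lower (pvClean (pvOr (d.get? "confidence") (some "medium")))
  let hidden_premise_prompt :=
    if hidden_premise_prompt = "" then
      PySem.Str.join "；" (([mental_state_summary, preferred_ai_style, support_strategy]).filter (fun p => p ≠ ""))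
    else hidden_premise_prompt
  let confidence := if confidence = "low" ∨ confidence = "medium" ∨ confidence = "high" then confidence else "medium"
  [("profile_summary", profile_summary),
   ("mental_state_summary", mental_state_summary),
   ("support_strategy", support_strategy),
   ("hidden_premise_prompt", hidden_premise_prompt),
   ("personality_traits", personality_traits),
   ("preference_summary", preference_summary),
   ("language_habit_summary", language_habit_summary),
   ("preferred_ai_style", preferred_ai_style),
   ("interest_hypothesis", interest_hypothesis),
   ("evidence_summary", evidence_summary),
   ("confidence", confidence)]

-- ===== PORT B =====
-- Source B's _SLOTS literal dict: reverse index source key -> (output field, priority slot)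
def pvSlotOf (k : String) : Option (String × Nat) :=
  if k = "user_profile_summary" then some ("profile_summary", 0)
  else if k = "profile_summary" then some ("profile_summary", 1)
  else if k = "learning_profile" then some ("profile_summary", 2)
  else if k = "mental_state_summary" then some ("mental_state_summary", 0)
  else if k = "mental_state" then some ("mental_state_summary", 1)
  else if k = "current_state" then some ("mental_state_summary", 2)
  else if k = "support_strategy" then some ("support_strategy", 0)
  else if k = "guidance_strategy" then some ("support_strategy", 1)
  else if k = "response_strategy" then some ("support_strategy", 2)
  else if k = "hidden_premise_prompt" then some ("hidden_premise_prompt", 0)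
  else if k = "assistant_premise" then some ("hidden_premise_prompt", 1)
  else if k = "hidden_prompt" then some ("hidden_premise_prompt", 2)
  else if k = "personality_traits" then some ("personality_traits", 0)
  else if k = "personality_summary" then some ("personality_traits", 1)
  else if k = "personality_guess" then some ("personality_traits", 2)
  else if k = "preference_summary" then some ("preference_summary", 0)
  else if k = "preferences" then some ("preference_summary", 1)
  else if k = "interest_preferences" then some ("preference_summary", 2)
  else if k = "language_habit_summary" then some ("language_habit_summary", 0)
  else if k = "language_style" then some ("language_habit_summary", 1)
  else if k = "expression_habits" then some ("language_habit_summary", 2)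
  else if k = "preferred_ai_style" then some ("preferred_ai_style", 0)
  else if k = "preferred_assistant_style" then some ("preferred_ai_style", 1)
  else if k = "preferred_response_style" then some ("preferred_ai_style", 2)
  else if k = "interest_hypothesis" then some ("interest_hypothesis", 0)
  else if k = "interest_guess" then some ("interest_hypothesis", 1)
  else if k = "interest_summary" then some ("interest_hypothesis", 2)
  else if k = "evidence_summary" then some ("evidence_summary", 0)
  else if k = "observation_evidence" then some ("evidence_summary", 1)
  else if k = "evidence" then some ("evidence_summary", 2)
  else none

def pvOrder : List String :=
  ["profile_summary", "mental_state_summary", "support_strategy",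
   "hidden_premise_prompt", "personality_traits", "preference_summary",
   "language_habit_summary", "preferred_ai_style", "interest_hypothesis",
   "evidence_summary"]

-- loop body of Source B's single pass: state = (cand, conf)
def pvStep (st : PySem.Dict String (List (Option String)) × Option String)
    (kv : String × String) : PySem.Dict String (List (Option String)) × Option String :=
  if kv.1 = "confidence" then (st.1, some kv.2)
  else
    match pvSlotOf kv.1 with
    | some fr => (st.1.insert fr.1 (((st.1.getD fr.1 []).set fr.2 (some kv.2))), st.2)
    | none => st

-- cand = {field: [None, None, None] for field in _ORDER}
def pvInit : PySem.Dict String (List (Option String)) :=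
  pvOrder.foldl (fun c f => c.insert f [none, none, none]) PySem.Dict.empty

-- `for x in cand[field]: if x: picked = str(x).strip(); break` (picked starts "")
def pvPick : List (Option String) → String
  | [] => ""
  | none :: xs => pvPick xs
  | some v :: xs => if v = "" then pvPick xs else PySem.Str.strip v

def normalize_psych_profile_payload_alt (payload : List (String × String)) : List (String × String) :=
  let st := payload.foldl pvStep (pvInit, none)
  let out := pvOrder.foldl (fun o f => o.insert f (pvPick (st.1.getD f []))) PySem.Dict.empty
  let out :=
    if out.getD "hidden_premise_prompt" "" = "" then
      out.insert "hidden_premise_prompt"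
        (PySem.Str.join "；"
          (([out.getD "mental_state_summary" "", out.getD "preferred_ai_style" "",
             out.getD "support_strategy" ""]).filter (fun p => p ≠ "")))
    else out
  let c := match st.2 with
    | some v => if v = "" then "medium" else PySem.Str.lower (PySem.Str.strip v)
    | none => "medium"
  let out := out.insert "confidence" (if c = "low" ∨ c = "medium" ∨ c = "high" then c else "medium")
  out.items

-- ===== PRECONDITION & SPEC =====
def Spec_normalize_psych_profile_payload (payload : List (String × String)) (out : List (String × String)) : Prop := out = normalize_psych_profile_payload_alt payload
instance (payload : List (String × String)) (out : List (String × String)) : Decidable (Spec_normalize_psych_profile_payload payload out) := by unfold Spec_normalize_psych_profile_payload; infer_instance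

-- ===== CLAIM (what is proved, stated in full; the proofs are below) =====
def Claim_equal_normalize_psych_profile_payload : Prop := ∀ (payload : List (String × String)), Dom_normalize_psych_profile_payload payload → Spec_normalize_psych_profile_payload payload (normalize_psych_profile_payload payload)

-- ===== LEMMAS AND PROOFS =====
-- get?_insert with the condition oriented `k = k'` (matching split_ifs hypotheses)
theorem pvGet?_insert (d : PySem.Dict String String) (k k' v : String) :
    (d.insert k v).get? k' = if k = k' then some v else d.get? k' := by
  by_cases h : k = k'
  · subst h; simp [PySem.Dict.get?_insert_self]
  · rw [PySem.Dict.get?_insert_of_ne _ _ (Ne.symm h), if_neg h]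

-- the candidate dict after the scan, as a function of the payload's dict
def pvCanon (d : PySem.Dict String String) : PySem.Dict String (List (Option String)) :=
  PySem.Dict.mk
    [("profile_summary", [d.get? "user_profile_summary", d.get? "profile_summary", d.get? "learning_profile"]),
     ("mental_state_summary", [d.get? "mental_state_summary", d.get? "mental_state", d.get? "current_state"]),
     ("support_strategy", [d.get? "support_strategy", d.get? "guidance_strategy", d.get? "response_strategy"]),
     ("hidden_premise_prompt", [d.get? "hidden_premise_prompt", d.get? "assistant_premise", d.get? "hidden_prompt"]),
     ("personality_traits", [d.get? "personality_traits", d.get? "personality_summary", d.get? "personality_guess"]),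
     ("preference_summary", [d.get? "preference_summary", d.get? "preferences", d.get? "interest_preferences"]),
     ("language_habit_summary", [d.get? "language_habit_summary", d.get? "language_style", d.get? "expression_habits"]),
     ("preferred_ai_style", [d.get? "preferred_ai_style", d.get? "preferred_assistant_style", d.get? "preferred_response_style"]),
     ("interest_hypothesis", [d.get? "interest_hypothesis", d.get? "interest_guess", d.get? "interest_summary"]),
     ("evidence_summary", [d.get? "evidence_summary", d.get? "observation_evidence", d.get? "evidence"])]

theorem pvStep_conf (d : PySem.Dict String String) (v : String) :
    pvStep (pvCanon d, d.get? "confidence") ("confidence", v) =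
      (pvCanon (d.insert "confidence" v), (d.insert "confidence" v).get? "confidence") := by
  unfold pvStep pvSlotOf
  dsimp only
  simp [pvCanon, pvGet?_insert]
set_option maxHeartbeats 1000000 in
theorem pvStep_key_0 (d : PySem.Dict String String) (v : String) :
    pvStep (pvCanon d, d.get? "confidence") ("user_profile_summary", v) =
      (pvCanon (d.insert "user_profile_summary" v), (d.insert "user_profile_summary" v).get? "confidence") := by
  unfold pvStep pvSlotOf
  dsimp only
  simp [Prod.ext_iff, PySem.Dict.ext_iff, pvCanon, pvGet?_insert,
    PySem.Dict.getD_eq_get?_getD, PySem.Dict.get?_mk_cons, PySem.Dict.items_insert]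
set_option maxHeartbeats 1000000 in
theorem pvStep_key_1 (d : PySem.Dict String String) (v : String) :
    pvStep (pvCanon d, d.get? "confidence") ("profile_summary", v) =
      (pvCanon (d.insert "profile_summary" v), (d.insert "profile_summary" v).get? "confidence") := by
  unfold pvStep pvSlotOf
  dsimp only
  simp [Prod.ext_iff, PySem.Dict.ext_iff, pvCanon, pvGet?_insert,
    PySem.Dict.getD_eq_get?_getD, PySem.Dict.get?_mk_cons, PySem.Dict.items_insert]
set_option maxHeartbeats 1000000 in
theorem pvStep_key_2 (d : PySem.Dict String String) (v : String) :
    pvStep (pvCanon d, d.get? "confidence") ("learning_profile", v) =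
      (pvCanon (d.insert "learning_profile" v), (d.insert "learning_profile" v).get? "confidence") := by
  unfold pvStep pvSlotOf
  dsimp only
  simp [Prod.ext_iff, PySem.Dict.ext_iff, pvCanon, pvGet?_insert,
    PySem.Dict.getD_eq_get?_getD, PySem.Dict.get?_mk_cons, PySem.Dict.items_insert]
set_option maxHeartbeats 1000000 in
theorem pvStep_key_3 (d : PySem.Dict String String) (v : String) :
    pvStep (pvCanon d, d.get? "confidence") ("mental_state_summary", v) =
      (pvCanon (d.insert "mental_state_summary" v), (d.insert "mental_state_summary" v).get? "confidence") := by
  unfold pvStep pvSlotOf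
  dsimp only
  simp [Prod.ext_iff, PySem.Dict.ext_iff, pvCanon, pvGet?_insert,
    PySem.Dict.getD_eq_get?_getD, PySem.Dict.get?_mk_cons, PySem.Dict.items_insert]
set_option maxHeartbeats 1000000 in
theorem pvStep_key_4 (d : PySem.Dict String String) (v : String) :
    pvStep (pvCanon d, d.get? "confidence") ("mental_state", v) =
      (pvCanon (d.insert "mental_state" v), (d.insert "mental_state" v).get? "confidence") := by
  unfold pvStep pvSlotOf
  dsimp only
  simp [Prod.ext_iff, PySem.Dict.ext_iff, pvCanon, pvGet?_insert,
    PySem.Dict.getD_eq_get?_getD, PySem.Dict.get?_mk_cons, PySem.Dict.items_insert]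
set_option maxHeartbeats 1000000 in
theorem pvStep_key_5 (d : PySem.Dict String String) (v : String) :
    pvStep (pvCanon d, d.get? "confidence") ("current_state", v) =
      (pvCanon (d.insert "current_state" v), (d.insert "current_state" v).get? "confidence") := by
  unfold pvStep pvSlotOf
  dsimp only
  simp [Prod.ext_iff, PySem.Dict.ext_iff, pvCanon, pvGet?_insert,
    PySem.Dict.getD_eq_get?_getD, PySem.Dict.get?_mk_cons, PySem.Dict.items_insert]
set_option maxHeartbeats 1000000 in
theorem pvStep_key_6 (d : PySem.Dict String String) (v : String) :
    pvStep (pvCanon d, d.get? "confidence") ("support_strategy", v) =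
      (pvCanon (d.insert "support_strategy" v), (d.insert "support_strategy" v).get? "confidence") := by
  unfold pvStep pvSlotOf
  dsimp only
  simp [Prod.ext_iff, PySem.Dict.ext_iff, pvCanon, pvGet?_insert,
    PySem.Dict.getD_eq_get?_getD, PySem.Dict.get?_mk_cons, PySem.Dict.items_insert]
set_option maxHeartbeats 1000000 in
theorem pvStep_key_7 (d : PySem.Dict String String) (v : String) :
    pvStep (pvCanon d, d.get? "confidence") ("guidance_strategy", v) =
      (pvCanon (d.insert "guidance_strategy" v), (d.insert "guidance_strategy" v).get? "confidence") := by
  unfold pvStep pvSlotOf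
  dsimp only
  simp [Prod.ext_iff, PySem.Dict.ext_iff, pvCanon, pvGet?_insert,
    PySem.Dict.getD_eq_get?_getD, PySem.Dict.get?_mk_cons, PySem.Dict.items_insert]
set_option maxHeartbeats 1000000 in
theorem pvStep_key_8 (d : PySem.Dict String String) (v : String) :
    pvStep (pvCanon d, d.get? "confidence") ("response_strategy", v) =
      (pvCanon (d.insert "response_strategy" v), (d.insert "response_strategy" v).get? "confidence") := by
  unfold pvStep pvSlotOf
  dsimp only
  simp [Prod.ext_iff, PySem.Dict.ext_iff, pvCanon, pvGet?_insert,
    PySem.Dict.getD_eq_get?_getD, PySem.Dict.get?_mk_cons, PySem.Dict.items_insert]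
set_option maxHeartbeats 1000000 in
theorem pvStep_key_9 (d : PySem.Dict String String) (v : String) :
    pvStep (pvCanon d, d.get? "confidence") ("hidden_premise_prompt", v) =
      (pvCanon (d.insert "hidden_premise_prompt" v), (d.insert "hidden_premise_prompt" v).get? "confidence") := by
  unfold pvStep pvSlotOf
  dsimp only
  simp [Prod.ext_iff, PySem.Dict.ext_iff, pvCanon, pvGet?_insert,
    PySem.Dict.getD_eq_get?_getD, PySem.Dict.get?_mk_cons, PySem.Dict.items_insert]
set_option maxHeartbeats 1000000 in
theorem pvStep_key_10 (d : PySem.Dict String String) (v : String) :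
    pvStep (pvCanon d, d.get? "confidence") ("assistant_premise", v) =
      (pvCanon (d.insert "assistant_premise" v), (d.insert "assistant_premise" v).get? "confidence") := by
  unfold pvStep pvSlotOf
  dsimp only
  simp [Prod.ext_iff, PySem.Dict.ext_iff, pvCanon, pvGet?_insert,
    PySem.Dict.getD_eq_get?_getD, PySem.Dict.get?_mk_cons, PySem.Dict.items_insert]
set_option maxHeartbeats 1000000 in
theorem pvStep_key_11 (d : PySem.Dict String String) (v : String) :
    pvStep (pvCanon d, d.get? "confidence") ("hidden_prompt", v) =
      (pvCanon (d.insert "hidden_prompt" v), (d.insert "hidden_prompt" v).get? "confidence") := by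
  unfold pvStep pvSlotOf
  dsimp only
  simp [Prod.ext_iff, PySem.Dict.ext_iff, pvCanon, pvGet?_insert,
    PySem.Dict.getD_eq_get?_getD, PySem.Dict.get?_mk_cons, PySem.Dict.items_insert]
set_option maxHeartbeats 1000000 in
theorem pvStep_key_12 (d : PySem.Dict String String) (v : String) :
    pvStep (pvCanon d, d.get? "confidence") ("personality_traits", v) =
      (pvCanon (d.insert "personality_traits" v), (d.insert "personality_traits" v).get? "confidence") := by
  unfold pvStep pvSlotOf
  dsimp only
  simp [Prod.ext_iff, PySem.Dict.ext_iff, pvCanon, pvGet?_insert,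
    PySem.Dict.getD_eq_get?_getD, PySem.Dict.get?_mk_cons, PySem.Dict.items_insert]
set_option maxHeartbeats 1000000 in
theorem pvStep_key_13 (d : PySem.Dict String String) (v : String) :
    pvStep (pvCanon d, d.get? "confidence") ("personality_summary", v) =
      (pvCanon (d.insert "personality_summary" v), (d.insert "personality_summary" v).get? "confidence") := by
  unfold pvStep pvSlotOf
  dsimp only
  simp [Prod.ext_iff, PySem.Dict.ext_iff, pvCanon, pvGet?_insert,
    PySem.Dict.getD_eq_get?_getD, PySem.Dict.get?_mk_cons, PySem.Dict.items_insert]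
set_option maxHeartbeats 1000000 in
theorem pvStep_key_14 (d : PySem.Dict String String) (v : String) :
    pvStep (pvCanon d, d.get? "confidence") ("personality_guess", v) =
      (pvCanon (d.insert "personality_guess" v), (d.insert "personality_guess" v).get? "confidence") := by
  unfold pvStep pvSlotOf
  dsimp only
  simp [Prod.ext_iff, PySem.Dict.ext_iff, pvCanon, pvGet?_insert,
    PySem.Dict.getD_eq_get?_getD, PySem.Dict.get?_mk_cons, PySem.Dict.items_insert]
set_option maxHeartbeats 1000000 in
theorem pvStep_key_15 (d : PySem.Dict String String) (v : String) :
    pvStep (pvCanon d, d.get? "confidence") ("preference_summary", v) =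
      (pvCanon (d.insert "preference_summary" v), (d.insert "preference_summary" v).get? "confidence") := by
  unfold pvStep pvSlotOf
  dsimp only
  simp [Prod.ext_iff, PySem.Dict.ext_iff, pvCanon, pvGet?_insert,
    PySem.Dict.getD_eq_get?_getD, PySem.Dict.get?_mk_cons, PySem.Dict.items_insert]
set_option maxHeartbeats 1000000 in
theorem pvStep_key_16 (d : PySem.Dict String String) (v : String) :
    pvStep (pvCanon d, d.get? "confidence") ("preferences", v) =
      (pvCanon (d.insert "preferences" v), (d.insert "preferences" v).get? "confidence") := by
  unfold pvStep pvSlotOf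
  dsimp only
  simp [Prod.ext_iff, PySem.Dict.ext_iff, pvCanon, pvGet?_insert,
    PySem.Dict.getD_eq_get?_getD, PySem.Dict.get?_mk_cons, PySem.Dict.items_insert]
set_option maxHeartbeats 1000000 in
theorem pvStep_key_17 (d : PySem.Dict String String) (v : String) :
    pvStep (pvCanon d, d.get? "confidence") ("interest_preferences", v) =
      (pvCanon (d.insert "interest_preferences" v), (d.insert "interest_preferences" v).get? "confidence") := by
  unfold pvStep pvSlotOf
  dsimp only
  simp [Prod.ext_iff, PySem.Dict.ext_iff, pvCanon, pvGet?_insert,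
    PySem.Dict.getD_eq_get?_getD, PySem.Dict.get?_mk_cons, PySem.Dict.items_insert]
set_option maxHeartbeats 1000000 in
theorem pvStep_key_18 (d : PySem.Dict String String) (v : String) :
    pvStep (pvCanon d, d.get? "confidence") ("language_habit_summary", v) =
      (pvCanon (d.insert "language_habit_summary" v), (d.insert "language_habit_summary" v).get? "confidence") := by
  unfold pvStep pvSlotOf
  dsimp only
  simp [Prod.ext_iff, PySem.Dict.ext_iff, pvCanon, pvGet?_insert,
    PySem.Dict.getD_eq_get?_getD, PySem.Dict.get?_mk_cons, PySem.Dict.items_insert]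
set_option maxHeartbeats 1000000 in
theorem pvStep_key_19 (d : PySem.Dict String String) (v : String) :
    pvStep (pvCanon d, d.get? "confidence") ("language_style", v) =
      (pvCanon (d.insert "language_style" v), (d.insert "language_style" v).get? "confidence") := by
  unfold pvStep pvSlotOf
  dsimp only
  simp [Prod.ext_iff, PySem.Dict.ext_iff, pvCanon, pvGet?_insert,
    PySem.Dict.getD_eq_get?_getD, PySem.Dict.get?_mk_cons, PySem.Dict.items_insert]
set_option maxHeartbeats 1000000 in
theorem pvStep_key_20 (d : PySem.Dict String String) (v : String) :
    pvStep (pvCanon d, d.get? "confidence") ("expression_habits", v) =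
      (pvCanon (d.insert "expression_habits" v), (d.insert "expression_habits" v).get? "confidence") := by
  unfold pvStep pvSlotOf
  dsimp only
  simp [Prod.ext_iff, PySem.Dict.ext_iff, pvCanon, pvGet?_insert,
    PySem.Dict.getD_eq_get?_getD, PySem.Dict.get?_mk_cons, PySem.Dict.items_insert]
set_option maxHeartbeats 1000000 in
theorem pvStep_key_21 (d : PySem.Dict String String) (v : String) :
    pvStep (pvCanon d, d.get? "confidence") ("preferred_ai_style", v) =
      (pvCanon (d.insert "preferred_ai_style" v), (d.insert "preferred_ai_style" v).get? "confidence") := by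
  unfold pvStep pvSlotOf
  dsimp only
  simp [Prod.ext_iff, PySem.Dict.ext_iff, pvCanon, pvGet?_insert,
    PySem.Dict.getD_eq_get?_getD, PySem.Dict.get?_mk_cons, PySem.Dict.items_insert]
set_option maxHeartbeats 1000000 in
theorem pvStep_key_22 (d : PySem.Dict String String) (v : String) :
    pvStep (pvCanon d, d.get? "confidence") ("preferred_assistant_style", v) =
      (pvCanon (d.insert "preferred_assistant_style" v), (d.insert "preferred_assistant_style" v).get? "confidence") := by
  unfold pvStep pvSlotOf
  dsimp only
  simp [Prod.ext_iff, PySem.Dict.ext_iff, pvCanon, pvGet?_insert,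
    PySem.Dict.getD_eq_get?_getD, PySem.Dict.get?_mk_cons, PySem.Dict.items_insert]
set_option maxHeartbeats 1000000 in
theorem pvStep_key_23 (d : PySem.Dict String String) (v : String) :
    pvStep (pvCanon d, d.get? "confidence") ("preferred_response_style", v) =
      (pvCanon (d.insert "preferred_response_style" v), (d.insert "preferred_response_style" v).get? "confidence") := by
  unfold pvStep pvSlotOf
  dsimp only
  simp [Prod.ext_iff, PySem.Dict.ext_iff, pvCanon, pvGet?_insert,
    PySem.Dict.getD_eq_get?_getD, PySem.Dict.get?_mk_cons, PySem.Dict.items_insert]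
set_option maxHeartbeats 1000000 in
theorem pvStep_key_24 (d : PySem.Dict String String) (v : String) :
    pvStep (pvCanon d, d.get? "confidence") ("interest_hypothesis", v) =
      (pvCanon (d.insert "interest_hypothesis" v), (d.insert "interest_hypothesis" v).get? "confidence") := by
  unfold pvStep pvSlotOf
  dsimp only
  simp [Prod.ext_iff, PySem.Dict.ext_iff, pvCanon, pvGet?_insert,
    PySem.Dict.getD_eq_get?_getD, PySem.Dict.get?_mk_cons, PySem.Dict.items_insert]
set_option maxHeartbeats 1000000 in
theorem pvStep_key_25 (d : PySem.Dict String String) (v : String) :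
    pvStep (pvCanon d, d.get? "confidence") ("interest_guess", v) =
      (pvCanon (d.insert "interest_guess" v), (d.insert "interest_guess" v).get? "confidence") := by
  unfold pvStep pvSlotOf
  dsimp only
  simp [Prod.ext_iff, PySem.Dict.ext_iff, pvCanon, pvGet?_insert,
    PySem.Dict.getD_eq_get?_getD, PySem.Dict.get?_mk_cons, PySem.Dict.items_insert]
set_option maxHeartbeats 1000000 in
theorem pvStep_key_26 (d : PySem.Dict String String) (v : String) :
    pvStep (pvCanon d, d.get? "confidence") ("interest_summary", v) =
      (pvCanon (d.insert "interest_summary" v), (d.insert "interest_summary" v).get? "confidence") := by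
  unfold pvStep pvSlotOf
  dsimp only
  simp [Prod.ext_iff, PySem.Dict.ext_iff, pvCanon, pvGet?_insert,
    PySem.Dict.getD_eq_get?_getD, PySem.Dict.get?_mk_cons, PySem.Dict.items_insert]
set_option maxHeartbeats 1000000 in
theorem pvStep_key_27 (d : PySem.Dict String String) (v : String) :
    pvStep (pvCanon d, d.get? "confidence") ("evidence_summary", v) =
      (pvCanon (d.insert "evidence_summary" v), (d.insert "evidence_summary" v).get? "confidence") := by
  unfold pvStep pvSlotOf
  dsimp only
  simp [Prod.ext_iff, PySem.Dict.ext_iff, pvCanon, pvGet?_insert,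
    PySem.Dict.getD_eq_get?_getD, PySem.Dict.get?_mk_cons, PySem.Dict.items_insert]
set_option maxHeartbeats 1000000 in
theorem pvStep_key_28 (d : PySem.Dict String String) (v : String) :
    pvStep (pvCanon d, d.get? "confidence") ("observation_evidence", v) =
      (pvCanon (d.insert "observation_evidence" v), (d.insert "observation_evidence" v).get? "confidence") := by
  unfold pvStep pvSlotOf
  dsimp only
  simp [Prod.ext_iff, PySem.Dict.ext_iff, pvCanon, pvGet?_insert,
    PySem.Dict.getD_eq_get?_getD, PySem.Dict.get?_mk_cons, PySem.Dict.items_insert]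
set_option maxHeartbeats 1000000 in
theorem pvStep_key_29 (d : PySem.Dict String String) (v : String) :
    pvStep (pvCanon d, d.get? "confidence") ("evidence", v) =
      (pvCanon (d.insert "evidence" v), (d.insert "evidence" v).get? "confidence") := by
  unfold pvStep pvSlotOf
  dsimp only
  simp [Prod.ext_iff, PySem.Dict.ext_iff, pvCanon, pvGet?_insert,
    PySem.Dict.getD_eq_get?_getD, PySem.Dict.get?_mk_cons, PySem.Dict.items_insert]
set_option maxHeartbeats 1000000 in
theorem pvStep_other (d : PySem.Dict String String) (k v : String)
    (h0 : ¬ k = "confidence") (h1 : ¬ k = "user_profile_summary") (h2 : ¬ k = "profile_summary") (h3 : ¬ k = "learning_profile") (h4 : ¬ k = "mental_state_summary") (h5 : ¬ k = "mental_state") (h6 : ¬ k = "current_state") (h7 : ¬ k = "support_strategy") (h8 : ¬ k = "guidance_strategy") (h9 : ¬ k = "response_strategy") (h10 : ¬ k = "hidden_premise_prompt") (h11 : ¬ k = "assistant_premise") (h12 : ¬ k = "hidden_prompt") (h13 : ¬ k = "personality_traits") (h14 : ¬ k = "personality_summary") (h15 : ¬ k = "personality_guess") (h16 : ¬ k = "preference_summary")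 (h17 : ¬ k = "preferences") (h18 : ¬ k = "interest_preferences") (h19 : ¬ k = "language_habit_summary") (h20 : ¬ k = "language_style") (h21 : ¬ k = "expression_habits") (h22 : ¬ k = "preferred_ai_style") (h23 : ¬ k = "preferred_assistant_style") (h24 : ¬ k = "preferred_response_style") (h25 : ¬ k = "interest_hypothesis") (h26 : ¬ k = "interest_guess") (h27 : ¬ k = "interest_summary") (h28 : ¬ k = "evidence_summary") (h29 : ¬ k = "observation_evidence") (h30 : ¬ k = "evidence") :
    pvStep (pvCanon d, d.get? "confidence") (k, v) =
      (pvCanon (d.insert k v), (d.insert k v).get? "confidence") := by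
  unfold pvStep pvSlotOf
  dsimp only
  simp [pvCanon, pvGet?_insert, h0, h1, h2, h3, h4, h5, h6, h7, h8, h9, h10, h11, h12, h13, h14, h15, h16, h17, h18, h19, h20, h21, h22, h23, h24, h25, h26, h27, h28, h29, h30]
set_option maxHeartbeats 1000000 in
theorem pvFold (p : List (String × String)) :
    p.foldl pvStep (pvInit, none) =
      (pvCanon (PySem.Dict.ofList p), (PySem.Dict.ofList p).get? "confidence") := by
  induction p using List.reverseRecOn with
  | nil => decide
  | append_singleton xs x ih =>
    obtain ⟨k, v⟩ := x
    rw [List.foldl_append, ih,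
      show PySem.Dict.ofList (xs ++ [(k, v)]) = (PySem.Dict.ofList xs).insert k v from by
        simp [PySem.Dict.ofList, PySem.Dict.update]]
    simp only [List.foldl]
    by_cases h0 : k = "confidence"
    · subst h0; exact pvStep_conf _ _
    by_cases h1 : k = "user_profile_summary"
    · subst h1; exact pvStep_key_0 _ _
    by_cases h2 : k = "profile_summary"
    · subst h2; exact pvStep_key_1 _ _
    by_cases h3 : k = "learning_profile"
    · subst h3; exact pvStep_key_2 _ _
    by_cases h4 : k = "mental_state_summary"
    · subst h4; exact pvStep_key_3 _ _
    by_cases h5 : k = "mental_state"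
    · subst h5; exact pvStep_key_4 _ _
    by_cases h6 : k = "current_state"
    · subst h6; exact pvStep_key_5 _ _
    by_cases h7 : k = "support_strategy"
    · subst h7; exact pvStep_key_6 _ _
    by_cases h8 : k = "guidance_strategy"
    · subst h8; exact pvStep_key_7 _ _
    by_cases h9 : k = "response_strategy"
    · subst h9; exact pvStep_key_8 _ _
    by_cases h10 : k = "hidden_premise_prompt"
    · subst h10; exact pvStep_key_9 _ _
    by_cases h11 : k = "assistant_premise"
    · subst h11; exact pvStep_key_10 _ _
    by_cases h12 : k = "hidden_prompt"
    · subst h12; exact pvStep_key_11 _ _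
    by_cases h13 : k = "personality_traits"
    · subst h13; exact pvStep_key_12 _ _
    by_cases h14 : k = "personality_summary"
    · subst h14; exact pvStep_key_13 _ _
    by_cases h15 : k = "personality_guess"
    · subst h15; exact pvStep_key_14 _ _
    by_cases h16 : k = "preference_summary"
    · subst h16; exact pvStep_key_15 _ _
    by_cases h17 : k = "preferences"
    · subst h17; exact pvStep_key_16 _ _
    by_cases h18 : k = "interest_preferences"
    · subst h18; exact pvStep_key_17 _ _
    by_cases h19 : k = "language_habit_summary"
    · subst h19; exact pvStep_key_18 _ _
    by_cases h20 : k = "language_style"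
    · subst h20; exact pvStep_key_19 _ _
    by_cases h21 : k = "expression_habits"
    · subst h21; exact pvStep_key_20 _ _
    by_cases h22 : k = "preferred_ai_style"
    · subst h22; exact pvStep_key_21 _ _
    by_cases h23 : k = "preferred_assistant_style"
    · subst h23; exact pvStep_key_22 _ _
    by_cases h24 : k = "preferred_response_style"
    · subst h24; exact pvStep_key_23 _ _
    by_cases h25 : k = "interest_hypothesis"
    · subst h25; exact pvStep_key_24 _ _
    by_cases h26 : k = "interest_guess"
    · subst h26; exact pvStep_key_25 _ _
    by_cases h27 : k = "interest_summary"
    · subst h27; exact pvStep_key_26 _ _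
    by_cases h28 : k = "evidence_summary"
    · subst h28; exact pvStep_key_27 _ _
    by_cases h29 : k = "observation_evidence"
    · subst h29; exact pvStep_key_28 _ _
    by_cases h30 : k = "evidence"
    · subst h30; exact pvStep_key_29 _ _
    exact pvStep_other _ _ _ h0 h1 h2 h3 h4 h5 h6 h7 h8 h9 h10 h11 h12 h13 h14 h15 h16 h17 h18 h19 h20 h21 h22 h23 h24 h25 h26 h27 h28 h29 h30

theorem pvPick3 (a b c : Option String) :
    pvPick [a, b, c] = pvClean (pvOr (pvOr a b) c) := by
  cases a <;> cases b <;> cases c <;>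
    simp only [pvPick, pvOr, pvClean, Option.getD_none, Option.getD_some] <;>
    split_ifs <;> simp_all [PySem.Str.strip] <;> decide

theorem pvConfEq (o : Option String) :
    (match o with
      | some v => if v = "" then "medium" else PySem.Str.lower (PySem.Str.strip v)
      | none => "medium") =
    PySem.Str.lower (pvClean (pvOr o (some "medium"))) := by
  cases o <;> simp only [pvClean, pvOr, Option.getD_none, Option.getD_some] <;>
    split_ifs <;> simp_all <;> decide

set_option maxHeartbeats 4000000 in
theorem normalize_psych_profile_payload_spec : Claim_equal_normalize_psych_profile_payload := by
  intro payload _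
  unfold Spec_normalize_psych_profile_payload normalize_psych_profile_payload normalize_psych_profile_payload_alt
  rw [pvFold]
  simp only [pvOrder, List.foldl]
  simp only [pvCanon, PySem.Dict.getD_eq_get?_getD, PySem.Dict.get?_mk_cons,
    Option.getD_some, String.reduceBEq, Bool.false_eq_true, ite_true, ite_false]
  simp only [pvPick3]
  simp only [pvConfEq]
  generalize PySem.Str.lower (pvClean (pvOr ((PySem.Dict.ofList payload).get? "confidence") (some "medium"))) = c0
  generalize pvClean (pvOr (pvOr ((PySem.Dict.ofList payload).get? "user_profile_summary") ((PySem.Dict.ofList payload).get? "profile_summary")) ((PySem.Dict.ofList payload).get? "learning_profile")) = v1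
  generalize pvClean (pvOr (pvOr ((PySem.Dict.ofList payload).get? "mental_state_summary") ((PySem.Dict.ofList payload).get? "mental_state")) ((PySem.Dict.ofList payload).get? "current_state")) = v2
  generalize pvClean (pvOr (pvOr ((PySem.Dict.ofList payload).get? "support_strategy") ((PySem.Dict.ofList payload).get? "guidance_strategy")) ((PySem.Dict.ofList payload).get? "response_strategy")) = v3
  generalize pvClean (pvOr (pvOr ((PySem.Dict.ofList payload).get? "hidden_premise_prompt") ((PySem.Dict.ofList payload).get? "assistant_premise")) ((PySem.Dict.ofList payload).get? "hidden_prompt")) = v4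
  generalize pvClean (pvOr (pvOr ((PySem.Dict.ofList payload).get? "personality_traits") ((PySem.Dict.ofList payload).get? "personality_summary")) ((PySem.Dict.ofList payload).get? "personality_guess")) = v5
  generalize pvClean (pvOr (pvOr ((PySem.Dict.ofList payload).get? "preference_summary") ((PySem.Dict.ofList payload).get? "preferences")) ((PySem.Dict.ofList payload).get? "interest_preferences")) = v6
  generalize pvClean (pvOr (pvOr ((PySem.Dict.ofList payload).get? "language_habit_summary") ((PySem.Dict.ofList payload).get? "language_style")) ((PySem.Dict.ofList payload).get? "expression_habits")) = v7
  generalize pvClean (pvOr (pvOr ((PySem.Dict.ofList payload).get? "preferred_ai_style") ((PySem.Dict.ofList payload).get? "preferred_assistant_style")) ((PySem.Dict.ofList payload).get? "preferred_response_style")) = v8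
  generalize pvClean (pvOr (pvOr ((PySem.Dict.ofList payload).get? "interest_hypothesis") ((PySem.Dict.ofList payload).get? "interest_guess")) ((PySem.Dict.ofList payload).get? "interest_summary")) = v9
  generalize pvClean (pvOr (pvOr ((PySem.Dict.ofList payload).get? "evidence_summary") ((PySem.Dict.ofList payload).get? "observation_evidence")) ((PySem.Dict.ofList payload).get? "evidence")) = v10
  by_cases h4 : v4 = "" <;>
    simp [h4, PySem.Dict.insert, PySem.Dict.get?,
      PySem.Dict.contains, PySem.Dict.empty, List.find?]
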